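-- pv_equiv track=rewrite | github.com/baajayi/ntnl-churches-gcp | scripts/bulk_ingest.py | _join_cells
-- ===== SOURCE A (Python) =====
-- from typing import List, Dict, Optional, Tuple
--
-- def _join_cells(rows: List[List[Optional[str]]], max_rows: int) -> str:
--     out = []
--     for r_i, row in enumerate(rows):
--         if r_i >= max_rows:
--             out.append(f"... [truncated at {max_rows} rows]")
--             break
--         vals = []
--         for v in row:
--             s = "" if v is None else str(v)
--             vals.append(s)
--         out.append("\t".join(vals))
--     return "\n".join(out)
-- ===== SOURCE B (Python) =====
-- def _join_cells(rows, max_rows):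
--     def go(rs, budget):
--         # returns None for "no lines", else the fully joined suffix string
--         if not rs:
--             return None
--         if budget <= 0:
--             return f"... [truncated at {max_rows} rows]"
--         line = ""
--         first = True
--         for v in rs[0]:
--             cell = "" if v is None else str(v)
--             line = cell if first else line + "\t" + cell
--             first = False
--         rest = go(rs[1:], budget - 1)
--         return line if rest is None else line + "\n" + rest
--     res = go(rows, max_rows)
--     return "" if res is None else res
-- ===== Notes on version B (the rewrite author's own statement) =====
-- stated objective: alternative
-- what changed: Replaces A's two-stage build (collect a list of tab-joined lines, then '\n'.join) by a single recursion with a decreasing row budget that concatenates the final string directly, joining cells inline with a first-flag accumulator instead of building a vals list.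
import Mathlib
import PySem

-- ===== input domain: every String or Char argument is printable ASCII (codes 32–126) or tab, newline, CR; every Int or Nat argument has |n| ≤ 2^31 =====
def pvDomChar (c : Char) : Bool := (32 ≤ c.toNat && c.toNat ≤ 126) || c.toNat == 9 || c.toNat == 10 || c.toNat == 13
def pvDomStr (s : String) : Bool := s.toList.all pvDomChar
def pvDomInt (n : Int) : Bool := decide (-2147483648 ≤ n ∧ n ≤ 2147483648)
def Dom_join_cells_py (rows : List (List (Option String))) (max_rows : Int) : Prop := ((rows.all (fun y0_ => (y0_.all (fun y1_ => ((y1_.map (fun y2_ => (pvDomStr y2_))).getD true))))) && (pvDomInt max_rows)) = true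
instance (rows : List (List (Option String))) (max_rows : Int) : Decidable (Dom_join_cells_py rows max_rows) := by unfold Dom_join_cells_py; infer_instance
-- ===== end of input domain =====

-- B replaces A's list-building + "\n".join pass by a single recursion that concatenates the
-- final string directly (an Option-valued suffix builder with a decreasing row budget);
-- objective: alternative decomposition, same cost.

-- ===== PORT A =====
-- the truncation line f"... [truncated at {max_rows} rows]"
def pvMarker (max_rows : Int) : String :=
  "... [truncated at " ++ PySem.Int.toStr max_rows ++ " rows]"

-- A's outer loop: enumerate with r_i, break (= stop recursing) after appending the marker
def joinCellsLoopA (rows : List (List (Option String))) (max_rows : Int) (r_i : Nat) : List String :=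
  match rows with
  | [] => []
  | row :: rest =>
    if (r_i : Int) ≥ max_rows then [pvMarker max_rows]
    else
      -- inner loop: vals.append("" if v is None else str(v))
      (PySem.Str.join "\t" (row.foldl (fun vals v => vals ++ [v.getD ""]) [])) ::
        joinCellsLoopA rest max_rows (r_i + 1)

def join_cells_py (rows : List (List (Option String))) (max_rows : Int) : String :=
  PySem.Str.join "\n" (joinCellsLoopA rows max_rows 0)

-- ===== PORT B =====
-- inner loop of B: line = cell if first else line + "\t" + cell, over (line, first)
def lineB (row : List (Option String)) : String :=
  (row.foldl
    (fun (st : String × Bool) v =>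
      let cell := v.getD ""
      (if st.2 then cell else st.1 ++ "\t" ++ cell, false))
    ("", true)).1

-- B's recursive suffix builder: None = no lines, else the joined suffix string
def goB (max_rows : Int) (rs : List (List (Option String))) (budget : Int) : Option String :=
  match rs with
  | [] => none
  | row :: rest =>
    if budget ≤ 0 then some (pvMarker max_rows)
    else
      let line := lineB row
      match goB max_rows rest (budget - 1) with
      | none => some line
      | some restS => some (line ++ "\n" ++ restS)

def join_cells_py_alt (rows : List (List (Option String))) (max_rows : Int) : String :=
  (goB max_rows rows max_rows).getD ""

-- ===== PRECONDITION & SPEC =====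
def Spec_join_cells_py (rows : List (List (Option String))) (max_rows : Int) (out : String) : Prop := out = join_cells_py_alt rows max_rows
instance (rows : List (List (Option String))) (max_rows : Int) (out : String) : Decidable (Spec_join_cells_py rows max_rows out) := by unfold Spec_join_cells_py; infer_instance

-- ===== CLAIM (what is proved, stated in full; the proofs are below) =====
def Claim_equal_join_cells_py : Prop := ∀ (rows : List (List (Option String))) (max_rows : Int), Dom_join_cells_py rows max_rows → Spec_join_cells_py rows max_rows (join_cells_py rows max_rows)

-- ===== LEMMAS AND PROOFS =====

theorem join_cons (sep a : String) (l : List String) :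
    PySem.Str.join sep (a :: l) = if l = [] then a else a ++ sep ++ PySem.Str.join sep l := by
  cases l with
  | nil =>
    apply String.toList_injective
    simp [PySem.Str.join, PySem.Chars.join, List.intercalate]
  | cons b t =>
    apply String.toList_injective
    simp [PySem.Str.join, PySem.Chars.join, List.intercalate]

theorem foldl_append_getD (row : List (Option String)) (acc : List String) :
    row.foldl (fun vals v => vals ++ [v.getD ""]) acc
      = acc ++ row.map (fun v => v.getD "") := by
  induction row generalizing acc with
  | nil => simp
  | cons h t ih => simp [List.foldl, ih]

theorem lineB_loop (row : List (Option String)) (s : String) :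
    (row.foldl
      (fun (st : String × Bool) v =>
        let cell := v.getD ""
        (if st.2 then cell else st.1 ++ "\t" ++ cell, false))
      (s, false)).1
    = s ++ (if row = [] then ""
            else "\t" ++ PySem.Str.join "\t" (row.map (fun v => v.getD ""))) := by
  induction row generalizing s with
  | nil => simp
  | cons v t ih =>
    simp only [List.foldl, ih]
    cases t with
    | nil => simp [join_cons, String.append_assoc]
    | cons w u => simp [join_cons, String.append_assoc]

theorem lineB_eq (row : List (Option String)) :
    lineB row = PySem.Str.join "\t" (row.map (fun v => v.getD "")) := by
  cases row with
  | nil =>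
    apply String.toList_injective
    simp [lineB, PySem.Str.join, PySem.Chars.join, List.intercalate]
  | cons v t =>
    simp only [lineB, List.foldl, if_pos, lineB_loop]
    cases t with
    | nil => simp [join_cons]
    | cons w u => simp [join_cons, String.append_assoc]

theorem goB_eq (max_rows : Int) (rows : List (List (Option String))) (i : Nat) :
    goB max_rows rows (max_rows - i)
      = (match joinCellsLoopA rows max_rows i with
         | [] => none
         | l => some (PySem.Str.join "\n" l)) := by
  induction rows generalizing i with
  | nil => simp [goB, joinCellsLoopA]
  | cons row rest ih =>
    by_cases h : (i : Int) ≥ max_rows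
    · have hb : max_rows - i ≤ 0 := by omega
      simp only [goB, joinCellsLoopA, if_pos h, if_pos hb, join_cons]
      simp
    · have hb : ¬ max_rows - i ≤ 0 := by omega
      have hstep : max_rows - i - 1 = max_rows - (i + 1 : Nat) := by push_cast; ring
      simp only [goB, joinCellsLoopA, if_neg h, if_neg hb, hstep, ih (i + 1),
        foldl_append_getD, List.nil_append, join_cons]
      cases hA : joinCellsLoopA rest max_rows (i + 1) with
      | nil => simp [lineB_eq]
      | cons a l => simp [lineB_eq]

-- ===== VERDICT (by name: the statement is the Claim_ definition above) =====
theorem join_cells_py_spec : Claim_equal_join_cells_py := by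
  intro rows max_rows _
  unfold Spec_join_cells_py join_cells_py join_cells_py_alt
  have h := goB_eq max_rows rows 0
  simp only [Nat.cast_zero, sub_zero] at h
  rw [h]
  cases hA : joinCellsLoopA rows max_rows 0 with
  | nil =>
    apply String.toList_injective
    simp [PySem.Str.join, PySem.Chars.join, List.intercalate]
  | cons a l => simp
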